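-- pv_equiv track=rewrite | github.com/AvinashSubhash/Codechef-problems | Practice-Problems/FAIRELCT.py | calculate
-- ===== SOURCE A (Python) =====
-- def sums(array):
--     sums = 0
--     for i in array:
--         sums += i
--     return sums
--
-- def calculate(data1,data2):
--     data1 = sorted(data1)
--     data2 = sorted(data2,reverse=True)
--     count = 0
--     while sums(data1) < sums(data2):
--         if len(data1) - count <= 0 or len(data2) - count <= 0:
--             return count
--         else:
--             temp = data1[count]
--             data1[count] = data2[-count]
--             data2[-count] = temp
--             count += 1
--     if count == 0:
--         return -1
--     return count
-- ===== SOURCE B (Python) =====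
-- def calculate(data1, data2):
--     a = sorted(data1)
--     b = sorted(data2, reverse=True)
--     s1 = sum(a)
--     s2 = sum(b)
--     k = 0
--     while s1 < s2:
--         if k >= len(a) or k >= len(b):
--             return k
--         i = 0 if k == 0 else len(b) - k
--         delta = b[i] - a[k]
--         s1 += delta
--         s2 -= delta
--         k += 1
--     return -1 if k == 0 else k
-- ===== Notes on version B (the rewrite author's own statement) =====
-- stated objective: alternative
-- what changed: B keeps two running sums that it updates by the swapped pair's difference each iteration (reading only the untouched sorted originals, no list mutation), instead of A's re-summing both mutated arrays from scratch on every while-loop test.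
import Mathlib
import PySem

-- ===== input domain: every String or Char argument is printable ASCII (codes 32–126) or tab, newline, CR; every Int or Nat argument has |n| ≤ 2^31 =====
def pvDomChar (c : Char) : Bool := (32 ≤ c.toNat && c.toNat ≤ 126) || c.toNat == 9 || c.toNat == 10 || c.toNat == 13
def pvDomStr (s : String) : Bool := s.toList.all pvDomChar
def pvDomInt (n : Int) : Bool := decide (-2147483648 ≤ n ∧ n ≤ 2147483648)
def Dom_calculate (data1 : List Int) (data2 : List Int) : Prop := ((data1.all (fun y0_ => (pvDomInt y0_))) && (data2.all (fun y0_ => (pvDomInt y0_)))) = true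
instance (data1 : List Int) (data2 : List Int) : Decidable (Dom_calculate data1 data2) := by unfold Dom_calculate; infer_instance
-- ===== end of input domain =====

-- B replaces A's per-iteration re-summation of both (mutated) arrays by running sums
-- updated incrementally from the two sorted originals, with no list mutation at all (objective: alternative).

-- ===== PORT A =====
-- helper 'sums' of the Python module
def sumsA (array : List Int) : Int := array.foldl (fun s i => s + i) 0

-- the while-loop of A, with the two lists as mutable state; pyGetD/pySetD are in range
-- whenever reached (the length guard just above returned otherwise)
def calcLoopA (d1 d2 : List Int) (count : Nat) : Int :=
  if sumsA d1 < sumsA d2 then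
    if (d1.length : Int) - (count : Int) ≤ 0 ∨ (d2.length : Int) - (count : Int) ≤ 0 then
      (count : Int)
    else
      let temp := PySem.List.pyGetD d1 (count : Int) 0
      let d1' := PySem.List.pySetD d1 (count : Int) (PySem.List.pyGetD d2 (-(count : Int)) 0)
      let d2' := PySem.List.pySetD d2 (-(count : Int)) temp
      calcLoopA d1' d2' (count + 1)
  else if count = 0 then -1 else (count : Int)
termination_by d1.length - count
decreasing_by
  simp only [PySem.List.length_pySetD]
  omega

def calculate (data1 : List Int) (data2 : List Int) : Int :=
  calcLoopA (PySem.List.sorted data1 (fun x => x) false)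
            (PySem.List.sorted data2 (fun x => x) true) 0

-- ===== PORT B =====
-- the while-loop of B: running sums s1 s2, reading only the untouched sorted originals
def calcLoopB (a b : List Int) (s1 s2 : Int) (k : Nat) : Int :=
  if s1 < s2 then
    if a.length ≤ k ∨ b.length ≤ k then (k : Int)
    else
      let i : Nat := if k = 0 then 0 else b.length - k
      let delta := PySem.List.pyGetD b (i : Int) 0 - PySem.List.pyGetD a (k : Int) 0
      calcLoopB a b (s1 + delta) (s2 - delta) (k + 1)
  else if k = 0 then -1 else (k : Int)
termination_by a.length - k

def calculate_alt (data1 : List Int) (data2 : List Int) : Int :=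
  let a := PySem.List.sorted data1 (fun x => x) false
  let b := PySem.List.sorted data2 (fun x => x) true
  calcLoopB a b a.sum b.sum 0

-- ===== PRECONDITION & SPEC =====
def Spec_calculate (data1 : List Int) (data2 : List Int) (out : Int) : Prop := out = calculate_alt data1 data2
instance (data1 : List Int) (data2 : List Int) (out : Int) : Decidable (Spec_calculate data1 data2 out) := by unfold Spec_calculate; infer_instance

-- ===== CLAIM (what is proved, stated in full; the proofs are below) =====
def Claim_equal_calculate : Prop := ∀ (data1 : List Int) (data2 : List Int), Dom_calculate data1 data2 → Spec_calculate data1 data2 (calculate data1 data2)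

-- ===== LEMMAS AND PROOFS =====

theorem foldl_add_sum (l : List Int) : ∀ c : Int, l.foldl (fun s i => s + i) c = c + l.sum := by
  induction l with
  | nil => intro c; simp
  | cons x t ih => intro c; simp [List.foldl_cons, ih, List.sum_cons]; ring

theorem sumsA_eq_sum (l : List Int) : sumsA l = l.sum := by
  simpa using foldl_add_sum l 0

theorem sum_set_getD (l : List Int) (n : Nat) (v : Int) (h : n < l.length) :
    (l.set n v).sum = l.sum - l.getD n 0 + v := by
  induction l generalizing n with
  | nil => simp at h
  | cons x t ih =>
    cases n with
    | zero => simp [List.sum_cons]; ring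
    | succ m =>
      simp only [List.set_cons_succ, List.sum_cons, List.getD_cons_succ]
      rw [ih m (by simpa using h)]
      ring

theorem getD_set_ne (l : List Int) (n j : Nat) (v : Int) (h : j ≠ n) :
    (l.set n v).getD j 0 = l.getD j 0 := by
  simp [List.getD, List.getElem?_set_ne (Ne.symm h)]

theorem loop_eq (n : Nat) (a b : List Int) : ∀ (d1 d2 : List Int) (k : Nat),
    d1.length = a.length → d2.length = b.length → a.length - k ≤ n →
    (∀ j, k ≤ j → d1.getD j 0 = a.getD j 0) →
    (∀ j, j < b.length → (k = 0 ∨ (1 ≤ j ∧ j + k ≤ b.length)) → d2.getD j 0 = b.getD j 0) →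
    calcLoopA d1 d2 k = calcLoopB a b (sumsA d1) (sumsA d2) k := by
  induction n with
  | zero =>
    intro d1 d2 k h1 h2 hn ha hb
    rw [calcLoopA, calcLoopB]
    by_cases hs : sumsA d1 < sumsA d2
    · have gA : (d1.length : Int) - (k : Int) ≤ 0 ∨ (d2.length : Int) - (k : Int) ≤ 0 := by
        left; omega
      have gB : a.length ≤ k ∨ b.length ≤ k := by left; omega
      rw [if_pos hs, if_pos hs, if_pos gA, if_pos gB]
    · rw [if_neg hs, if_neg hs]
  | succ m ih =>
    intro d1 d2 k h1 h2 hn ha hb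
    rw [calcLoopA, calcLoopB]
    by_cases hs : sumsA d1 < sumsA d2
    · rw [if_pos hs, if_pos hs]
      by_cases gB : a.length ≤ k ∨ b.length ≤ k
      · have gA : (d1.length : Int) - (k : Int) ≤ 0 ∨ (d2.length : Int) - (k : Int) ≤ 0 := by
          rcases gB with h | h
          · left; omega
          · right; omega
        rw [if_pos gA, if_pos gB]
      · have hka : k < a.length := by omega
        have hkb : k < b.length := by omega
        have gA : ¬ ((d1.length : Int) - (k : Int) ≤ 0 ∨ (d2.length : Int) - (k : Int) ≤ 0) := by
          omega
        rw [if_neg gA, if_neg gB]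
        show calcLoopA
            (PySem.List.pySetD d1 (k : Int) (PySem.List.pyGetD d2 (-(k : Int)) 0))
            (PySem.List.pySetD d2 (-(k : Int)) (PySem.List.pyGetD d1 (k : Int) 0))
            (k + 1)
          = calcLoopB a b
            (sumsA d1 + (PySem.List.pyGetD b (((if k = 0 then 0 else b.length - k : Nat)) : Int) 0
              - PySem.List.pyGetD a (k : Int) 0))
            (sumsA d2 - (PySem.List.pyGetD b (((if k = 0 then 0 else b.length - k : Nat)) : Int) 0
              - PySem.List.pyGetD a (k : Int) 0))
            (k + 1)
        set i0 : Nat := if k = 0 then 0 else b.length - k with hi0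
        have hi0lt : i0 < b.length := by rw [hi0]; split <;> omega
        -- the negative index -count resolves to position i0 (of both d2 and b: lengths agree)
        have hidx : PySem.List.pyIdx? d2.length (-(k : Int)) = some i0 := by
          by_cases hk0 : k = 0
          · subst hk0
            have h0 : i0 = 0 := by simp [hi0]
            rw [h0]
            simp only [Nat.cast_zero, neg_zero, PySem.List.pyIdx?]
            rw [if_pos le_rfl, if_pos (by omega)]
            simp
          · simp only [PySem.List.pyIdx?]
            rw [if_neg (by omega), if_pos (by omega)]
            rw [hi0, if_neg hk0]
            congr 1
            omega
        have htemp : PySem.List.pyGetD d1 (k : Int) 0 = a.getD k 0 := by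
          rw [PySem.List.pyGetD_natCast]
          exact ha k le_rfl
        have hd2i : d2.getD i0 0 = b.getD i0 0 := by
          by_cases hk0 : k = 0
          · exact hb i0 hi0lt (Or.inl hk0)
          · exact hb i0 hi0lt (Or.inr ⟨by rw [hi0, if_neg hk0]; omega,
              by rw [hi0, if_neg hk0]; omega⟩)
        have hv2 : PySem.List.pyGetD d2 (-(k : Int)) 0 = b.getD i0 0 := by
          simp only [PySem.List.pyGetD, PySem.List.pyGet?, hidx, Option.bind]
          exact hd2i
        have hset1 : PySem.List.pySetD d1 (k : Int) (PySem.List.pyGetD d2 (-(k : Int)) 0)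
            = d1.set k (b.getD i0 0) := by
          rw [hv2, PySem.List.pySetD_natCast]
        have hset2 : PySem.List.pySetD d2 (-(k : Int)) (PySem.List.pyGetD d1 (k : Int) 0)
            = d2.set i0 (a.getD k 0) := by
          rw [htemp]
          simp only [PySem.List.pySetD, PySem.List.pySet?, hidx, Option.map_some, Option.getD_some]
        have hbB : PySem.List.pyGetD b ((i0 : Nat) : Int) 0 = b.getD i0 0 :=
          PySem.List.pyGetD_natCast ..
        have haB : PySem.List.pyGetD a ((k : Nat) : Int) 0 = a.getD k 0 :=
          PySem.List.pyGetD_natCast ..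
        rw [hset1, hset2, hbB, haB]
        have hsum1 : sumsA (d1.set k (b.getD i0 0))
            = sumsA d1 + (b.getD i0 0 - a.getD k 0) := by
          rw [sumsA_eq_sum, sumsA_eq_sum, sum_set_getD d1 k _ (by omega), ha k le_rfl]
          ring
        have hsum2 : sumsA (d2.set i0 (a.getD k 0))
            = sumsA d2 - (b.getD i0 0 - a.getD k 0) := by
          rw [sumsA_eq_sum, sumsA_eq_sum, sum_set_getD d2 i0 _ (by omega), hd2i]
          ring
        rw [← hsum1, ← hsum2]
        apply ih
        · simpa using h1
        · simpa using h2
        · omega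
        · intro j hj
          rw [getD_set_ne _ _ _ _ (by omega)]
          exact ha j (by omega)
        · intro j hjl hjc
          rcases hjc with hjc | hjc
          · omega
          · have hji : j ≠ i0 := by
              rw [hi0]; split <;> omega
            rw [getD_set_ne _ _ _ _ hji]
            by_cases hk0 : k = 0
            · exact hb j hjl (Or.inl hk0)
            · exact hb j hjl (Or.inr ⟨by omega, by omega⟩)
    · rw [if_neg hs, if_neg hs]

-- ===== VERDICT (by name: the statement is the Claim_ definition above) =====
theorem calculate_spec : Claim_equal_calculate := by
  intro data1 data2 _
  show calculate data1 data2 = calculate_alt data1 data2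
  unfold calculate calculate_alt
  show calcLoopA _ _ 0 = calcLoopB (PySem.List.sorted data1 (fun x => x) false)
      (PySem.List.sorted data2 (fun x => x) true)
      (PySem.List.sorted data1 (fun x => x) false).sum
      (PySem.List.sorted data2 (fun x => x) true).sum 0
  rw [← sumsA_eq_sum (PySem.List.sorted data1 (fun x => x) false),
      ← sumsA_eq_sum (PySem.List.sorted data2 (fun x => x) true)]
  exact loop_eq (PySem.List.sorted data1 (fun x => x) false).length _ _ _ _ 0 rfl rfl (by omega)
    (fun j _ => rfl) (fun j _ _ => rfl)
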